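-- pv_equiv track=rewrite | github.com/AV-01/Advent-Of-Code-2024 | Day 9/test.py | remerge
-- ===== SOURCE A (Python) =====
-- def remerge(array):
--     result = []
--     dot_buffer = []
--     for sublist in array:
--         # Separate dots and non-dots
--         dots = [x for x in sublist if x == '.']
--         non_dots = [x for x in sublist if x != '.']
--
--         # Handle non-dots
--         if non_dots:
--             # Flush the dot buffer before adding non-dot sublist
--             if dot_buffer:
--                 result.append(dot_buffer)
--                 dot_buffer = []
--             result.append(non_dots)
--
--         # Handle dots
--         if dots:
--             dot_buffer.extend(dots)
--
--     # Flush any remaining dots at the end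
--     if dot_buffer:
--         result.append(dot_buffer)
--     return result
-- ===== SOURCE B (Python) =====
-- def _segments(array):
--     # Flat list of non-empty segments: per sublist, its non-dots then its dots.
--     segs = []
--     for sublist in array:
--         non_dots = [x for x in sublist if x != '.']
--         dots = [x for x in sublist if x == '.']
--         if non_dots:
--             segs.append(non_dots)
--         if dots:
--             segs.append(dots)
--     return segs
--
--
-- def _coalesce(segs):
--     # Recursively coalesce adjacent dot-only segments (back to front).
--     if not segs:
--         return []
--     seg, rest = segs[0], _coalesce(segs[1:])
--     if seg[0] == '.' and rest and rest[0][0] == '.':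
--         return [seg + rest[0]] + rest[1:]
--     return [seg] + rest
--
--
-- def remerge(array):
--     return _coalesce(_segments(array))
-- ===== Notes on version B (the rewrite author's own statement) =====
-- stated objective: alternative
-- what changed: Replaces the single forward pass with a mutable dot buffer by a two-phase build-then-coalesce design: first emit each sublist's non-dot and dot parts as flat segments, then recursively merge adjacent dot segments back to front.
import Mathlib
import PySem

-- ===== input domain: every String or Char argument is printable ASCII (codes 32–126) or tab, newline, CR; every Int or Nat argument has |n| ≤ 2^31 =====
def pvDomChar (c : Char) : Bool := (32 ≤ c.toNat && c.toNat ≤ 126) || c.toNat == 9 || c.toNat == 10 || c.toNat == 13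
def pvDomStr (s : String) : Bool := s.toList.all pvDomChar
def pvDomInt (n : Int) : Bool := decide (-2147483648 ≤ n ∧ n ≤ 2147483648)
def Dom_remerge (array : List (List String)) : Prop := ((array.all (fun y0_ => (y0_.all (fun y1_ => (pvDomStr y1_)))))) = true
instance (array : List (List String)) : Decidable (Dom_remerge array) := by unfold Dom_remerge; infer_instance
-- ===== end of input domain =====

-- B replaces A's single pass with a mutable dot buffer by a two-phase build-then-coalesce
-- design (alternative decomposition, same cost).


-- ===== PORT A =====
-- one loop iteration over (result, dot_buffer)
def remergeStep (st : List (List String) × List String) (sublist : List String) :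
    List (List String) × List String :=
  let dots := sublist.filter (fun x => x == ".")
  let nonDots := sublist.filter (fun x => x != ".")
  let st :=
    if !nonDots.isEmpty then
      let st := if !st.2.isEmpty then (st.1 ++ [st.2], ([] : List String)) else st
      (st.1 ++ [nonDots], st.2)
    else st
  if !dots.isEmpty then (st.1, st.2 ++ dots) else st

def remerge (array : List (List String)) : List (List String) :=
  let st := array.foldl remergeStep ([], [])
  if !st.2.isEmpty then st.1 ++ [st.2] else st.1

-- ===== PORT B =====
def segmentsB (array : List (List String)) : List (List String) :=
  array.foldl (fun segs sublist =>
    let nonDots := sublist.filter (fun x => x != ".")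
    let dots := sublist.filter (fun x => x == ".")
    let segs := if !nonDots.isEmpty then segs ++ [nonDots] else segs
    if !dots.isEmpty then segs ++ [dots] else segs) []

def coalesceB : List (List String) → List (List String)
  | [] => []
  | seg :: segs =>
    let rest := coalesceB segs
    match rest with
    | r0 :: rtl =>
      if seg.head? == some "." && r0.head? == some "." then (seg ++ r0) :: rtl
      else seg :: r0 :: rtl
    | [] => [seg]

def remerge_alt (array : List (List String)) : List (List String) :=
  coalesceB (segmentsB array)

-- ===== PRECONDITION & SPEC =====
def Spec_remerge (array : List (List String)) (out : List (List String)) : Prop := out = remerge_alt array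
instance (array : List (List String)) (out : List (List String)) : Decidable (Spec_remerge array out) := by unfold Spec_remerge; infer_instance

-- ===== CLAIM (what is proved, stated in full; the proofs are below) =====
def Claim_equal_remerge : Prop := ∀ (array : List (List String)), Dom_remerge array → Spec_remerge array (remerge array)

-- ===== LEMMAS AND PROOFS =====

-- "finish" of A's loop state
def pvFinish (st : List (List String) × List String) : List (List String) :=
  if !st.2.isEmpty then st.1 ++ [st.2] else st.1

-- flatMap form of B's first pass
def pvSegsF (array : List (List String)) : List (List String) :=
  array.flatMap (fun sublist =>
    (if !(sublist.filter (fun x => x != ".")).isEmpty then [sublist.filter (fun x => x != ".")] else []) ++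
    (if !(sublist.filter (fun x => x == ".")).isEmpty then [sublist.filter (fun x => x == ".")] else []))

-- a list made only of "."
def pvAllDots (l : List String) : Prop := ∀ x ∈ l, x = "."

theorem segmentsB_eq_aux (array : List (List String)) (acc : List (List String)) :
    array.foldl (fun segs sublist =>
      let nonDots := sublist.filter (fun x => x != ".")
      let dots := sublist.filter (fun x => x == ".")
      let segs := if !nonDots.isEmpty then segs ++ [nonDots] else segs
      if !dots.isEmpty then segs ++ [dots] else segs) acc = acc ++ pvSegsF array := by
  induction array generalizing acc with
  | nil => simp [pvSegsF]
  | cons sub rest ih =>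
    simp only [List.foldl_cons, pvSegsF, List.flatMap_cons]
    rw [ih]
    split_ifs <;> simp [pvSegsF]

theorem segmentsB_eq (array : List (List String)) : segmentsB array = pvSegsF array := by
  unfold segmentsB
  simpa using segmentsB_eq_aux array []

-- A's step only appends to result
theorem remergeStep_res (st : List (List String) × List String) (sub : List String) :
    remergeStep st sub = (st.1 ++ (remergeStep ([], st.2) sub).1, (remergeStep ([], st.2) sub).2) := by
  simp only [remergeStep]
  split_ifs <;> simp_all

theorem foldA_res (array : List (List String)) (st : List (List String) × List String) :
    array.foldl remergeStep st =
      (st.1 ++ (array.foldl remergeStep ([], st.2)).1, (array.foldl remergeStep ([], st.2)).2) := by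
  induction array generalizing st with
  | nil => simp
  | cons sub rest ih =>
    simp only [List.foldl_cons]
    rw [ih (remergeStep st sub), ih (remergeStep ([], st.2) sub), remergeStep_res st sub]
    simp

-- coalesceB of a non-dot-headed segment just conses it
theorem coalesceB_nondot (nd : List String) (S : List (List String))
    (h : ¬ nd.head? = some ".") : coalesceB (nd :: S) = nd :: coalesceB S := by
  simp only [coalesceB]
  cases coalesceB S with
  | nil => rfl
  | cons r0 rtl => simp [h]

-- coalesceB of a dot-headed segment: characterisation
theorem coalesceB_dot (a : List String) (S : List (List String)) (ha : a.head? = some ".") :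
    coalesceB (a :: S) =
      (match coalesceB S with
       | r0 :: rtl => if r0.head? = some "." then (a ++ r0) :: rtl else a :: r0 :: rtl
       | [] => [a]) := by
  simp only [coalesceB]
  cases coalesceB S with
  | nil => rfl
  | cons r0 rtl =>
    by_cases h : r0.head? = some "." <;> simp [ha, h]

-- merging two dot segments before coalescing equals coalescing them separately
theorem coalesceB_merge (a b : List String) (S : List (List String))
    (ha : a.head? = some ".") (hb : b.head? = some ".") :
    coalesceB ((a ++ b) :: S) = coalesceB (a :: b :: S) := by
  have hab : (a ++ b).head? = some "." := by
    cases a with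
    | nil => simp at ha
    | cons x xs => simpa using ha
  rw [coalesceB_dot _ _ hab, coalesceB_dot a (b :: S) ha, coalesceB_dot b S hb]
  cases h : coalesceB S with
  | nil => simp [hb]
  | cons r0 rtl =>
    by_cases h0 : r0.head? = some "."
    · have hbr : (b ++ r0).head? = some "." := by
        cases b with
        | nil => simp at hb
        | cons x xs => simpa using hb
      simp [h0, hbr]
    · simp [h0, hb]

theorem allDots_head {l : List String} (h : pvAllDots l) (hne : ¬ l.isEmpty = true) :
    l.head? = some "." := by
  cases l with
  | nil => simp at hne
  | cons x xs => simpa using h x (by simp)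

theorem filter_dots_allDots (sub : List String) : pvAllDots (sub.filter (fun x => x == ".")) := by
  intro x hx
  have := List.of_mem_filter hx
  simpa using this

theorem filter_nondots_head (sub : List String)
    (hne : ¬ (sub.filter (fun x => x != ".")).isEmpty = true) :
    ¬ (sub.filter (fun x => x != ".")).head? = some "." := by
  cases h : sub.filter (fun x => x != ".") with
  | nil => simp [h] at hne
  | cons x xs =>
    have hx : x ∈ sub.filter (fun x => x != ".") := by simp [h]
    have := List.of_mem_filter hx
    simp only [List.head?_cons]
    intro hc
    simp [Option.some_inj.mp hc] at this

theorem pvSegsF_cons (sub : List String) (rest : List (List String)) :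
    pvSegsF (sub :: rest) =
      ((if !(sub.filter (fun x => x != ".")).isEmpty then [sub.filter (fun x => x != ".")] else []) ++
       (if !(sub.filter (fun x => x == ".")).isEmpty then [sub.filter (fun x => x == ".")] else [])) ++ pvSegsF rest := by
  simp [pvSegsF]

-- main invariant: running A's loop from an all-dot buffer computes B's coalesce
theorem main_inv (array : List (List String)) (buf : List String) (hbuf : pvAllDots buf) :
    pvFinish (array.foldl remergeStep ([], buf)) =
      coalesceB ((if !buf.isEmpty then [buf] else []) ++ pvSegsF array) := by
  induction array generalizing buf with
  | nil =>
    simp only [List.foldl_nil, pvSegsF, List.flatMap_nil, List.append_nil, pvFinish]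
    by_cases h : buf.isEmpty <;> simp [h, coalesceB]
  | cons sub rest ih =>
    simp only [List.foldl_cons, pvSegsF_cons]
    by_cases hn : (sub.filter (fun x => x != ".")).isEmpty
    · have e2 : (!(sub.filter (fun x => x != ".")).isEmpty) = false := by simp [hn]
      by_cases hd : (sub.filter (fun x => x == ".")).isEmpty
      · -- both empty: state unchanged, no segments
        have e1 : (!(sub.filter (fun x => x == ".")).isEmpty) = false := by simp [hd]
        rw [show remergeStep ([], buf) sub = ([], buf) by simp [remergeStep, hn, hd]]
        rw [ih buf hbuf]
        simp only [e1, e2, Bool.false_eq_true, reduceIte, List.nil_append, List.append_nil]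
        
      · -- only dots: buffer extended
        have e1 : (!(sub.filter (fun x => x == ".")).isEmpty) = true := by simp [hd]
        rw [show remergeStep ([], buf) sub = ([], buf ++ sub.filter (fun x => x == "."))
          by simp [remergeStep, hn, hd]]
        have hall : pvAllDots (buf ++ sub.filter (fun x => x == ".")) := by
          intro x hx
          rcases List.mem_append.mp hx with h | h
          · exact hbuf x h
          · exact filter_dots_allDots sub x h
        rw [ih _ hall]
        by_cases hb : buf.isEmpty
        · have hb0 : buf = [] := List.isEmpty_iff.mp hb
          simp only [hb0, List.nil_append, e1, e2, List.isEmpty_nil, Bool.not_true,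
            Bool.false_eq_true, reduceIte]
        · have hbT : (!buf.isEmpty) = true := by simp [List.isEmpty_iff] at hb ⊢; exact hb
          have hne : (!(buf ++ sub.filter (fun x => x == ".")).isEmpty) = true := by
            simp_all [List.isEmpty_iff]
          simp only [hne, hbT, e1, e2, Bool.false_eq_true, reduceIte, List.nil_append,
            List.cons_append, List.append_assoc]
          exact coalesceB_merge buf (sub.filter (fun x => x == ".")) (pvSegsF rest)
            (allDots_head hbuf hb) (allDots_head (filter_dots_allDots sub) (by simpa using hd))
    · -- non-dots present: flush buffer, emit nonDots, buffer := dots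
      have e2 : (!(sub.filter (fun x => x != ".")).isEmpty) = true := by simp [hn]
      have hndh : ¬ (sub.filter (fun x => x != ".")).head? = some "." :=
        filter_nondots_head sub hn
      rw [show remergeStep ([], buf) sub =
          ((if !buf.isEmpty then [buf] else []) ++ [sub.filter (fun x => x != ".")],
            sub.filter (fun x => x == ".")) by
        simp only [remergeStep, e2, reduceIte]
        by_cases hb : buf.isEmpty <;> by_cases hd : (sub.filter (fun x => x == ".")).isEmpty <;>
          simp_all [List.isEmpty_iff]]
      rw [foldA_res rest _]
      have hfin : ∀ (p : List (List String)) (q : List (List String) × List String),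
          pvFinish (p ++ q.1, q.2) = p ++ pvFinish q := by
        intro p q
        simp only [pvFinish]
        split_ifs <;> simp
      rw [hfin, ih _ (filter_dots_allDots sub)]
      have hc1 : coalesceB ((sub.filter (fun x => x != ".")) ::
          ((if !(sub.filter (fun x => x == ".")).isEmpty then [sub.filter (fun x => x == ".")] else []) ++ pvSegsF rest)) =
          (sub.filter (fun x => x != ".")) ::
          coalesceB ((if !(sub.filter (fun x => x == ".")).isEmpty then [sub.filter (fun x => x == ".")] else []) ++ pvSegsF rest) :=
        coalesceB_nondot _ _ hndh
      by_cases hb : buf.isEmpty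
      · have hb0 : buf = [] := List.isEmpty_iff.mp hb
        simp only [hb0, List.isEmpty_nil, Bool.not_true, Bool.false_eq_true, reduceIte,
          List.nil_append, e2, List.cons_append]
        rw [hc1]
      · have hbT : (!buf.isEmpty) = true := by simp [List.isEmpty_iff] at hb ⊢; exact hb
        simp only [hbT, e2, reduceIte, List.cons_append, List.nil_append]
        rw [coalesceB, hc1]
        have hndh2 : ¬ List.find? (fun x => x != ".") sub = some "." := by
          simpa using hndh
        simp [hndh2]

-- ===== VERDICT (by name: the statement is the Claim_ definition above) =====
theorem remerge_spec : Claim_equal_remerge := by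
  intro array _
  unfold Spec_remerge remerge remerge_alt
  rw [segmentsB_eq]
  have := main_inv array [] (by intro x hx; simp at hx)
  simpa [pvFinish] using this
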